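-- pv_equiv track=rewrite | github.com/chraltro/db | src/dp/engine/sql_analysis.py | strip_config_comments
-- ===== SOURCE A (Python) =====
-- _META_PREFIXES = (
--     "-- config:",
--     "-- depends_on:",
--     "-- description:",
--     "-- col:",
--     "-- assert:",
-- )
--
-- def strip_config_comments(sql: str) -> str:
--     """Remove config/depends/description/col/assert comment lines, return the query."""
--     lines = sql.split("\n")
--     query_lines = []
--     for line in lines:
--         stripped = line.strip()
--         if any(stripped.startswith(prefix) for prefix in _META_PREFIXES):
--             continue
--         query_lines.append(line)
--     while query_lines and not query_lines[0].strip():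
--         query_lines.pop(0)
--     return "\n".join(query_lines)
-- ===== SOURCE B (Python) =====
-- _META_PREFIXES = (
--     "-- config:",
--     "-- depends_on:",
--     "-- description:",
--     "-- col:",
--     "-- assert:",
-- )
--
-- def strip_config_comments(sql: str) -> str:
--     """Remove config/depends/description/col/assert comment lines, return the query."""
--     query_lines = []
--     started = False
--     for line in sql.split("\n"):
--         stripped = line.strip()
--         if any(stripped.startswith(prefix) for prefix in _META_PREFIXES):
--             continue
--         if not started and not stripped:
--             continue
--         started = True
--         query_lines.append(line)
--     return "\n".join(query_lines)
-- ===== Notes on version B (the rewrite author's own statement) =====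
-- stated objective: simpler
-- what changed: Single pass with a boolean latch flag that fuses the meta-line filter and the leading-blank-line removal into one loop, replacing A's separate while-loop that pops from the front of the built list.
import Mathlib
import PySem

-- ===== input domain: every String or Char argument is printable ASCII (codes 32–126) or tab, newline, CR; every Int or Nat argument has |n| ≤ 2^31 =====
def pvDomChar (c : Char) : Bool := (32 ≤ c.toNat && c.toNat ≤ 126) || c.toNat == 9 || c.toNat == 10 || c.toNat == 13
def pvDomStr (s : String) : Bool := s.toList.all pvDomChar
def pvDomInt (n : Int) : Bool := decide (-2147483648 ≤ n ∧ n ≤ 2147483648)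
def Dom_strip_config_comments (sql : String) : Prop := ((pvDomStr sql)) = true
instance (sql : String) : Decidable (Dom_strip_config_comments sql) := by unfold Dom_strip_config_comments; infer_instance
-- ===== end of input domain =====

-- B fuses A's separate leading-blank-stripping while-loop into the filtering pass via a boolean latch flag (objective: simpler).


-- ===== PORT A =====
def metaPrefixes : List String :=
  ["-- config:", "-- depends_on:", "-- description:", "-- col:", "-- assert:"]

-- the while-loop `while query_lines and not query_lines[0].strip(): query_lines.pop(0)`
def popLeadingBlank : List String → List String
  | [] => []
  | l :: rest => if PySem.Str.strip l = "" then popLeadingBlank rest else l :: rest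

def strip_config_comments (sql : String) : String :=
  PySem.Str.join "\n" (popLeadingBlank
    (((PySem.Str.split? sql "\n").getD []).foldl (fun acc line =>
      if metaPrefixes.any (fun p => PySem.Str.startswith (PySem.Str.strip line) p) then acc
      else acc ++ [line]) []))

-- ===== PORT B =====
def strip_config_comments_alt (sql : String) : String :=
  PySem.Str.join "\n" (((PySem.Str.split? sql "\n").getD []).foldl
    (fun (st : Bool × List String) line =>
      if metaPrefixes.any (fun p => PySem.Str.startswith (PySem.Str.strip line) p) then st
      else if !st.1 && PySem.Str.strip line = "" then st
      else (true, st.2 ++ [line])) (false, [])).2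

-- ===== PRECONDITION & SPEC =====
def Spec_strip_config_comments (sql : String) (out : String) : Prop := out = strip_config_comments_alt sql
instance (sql : String) (out : String) : Decidable (Spec_strip_config_comments sql out) := by unfold Spec_strip_config_comments; infer_instance

-- ===== CLAIM (what is proved, stated in full; the proofs are below) =====
def Claim_equal_strip_config_comments : Prop := ∀ (sql : String), Dom_strip_config_comments sql → Spec_strip_config_comments sql (strip_config_comments sql)

-- ===== LEMMAS AND PROOFS =====

lemma popLeadingBlank_cons_blank (l : String) (xs : List String)
    (h : PySem.Str.strip l = "") : popLeadingBlank (l :: xs) = popLeadingBlank xs := by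
  simp [popLeadingBlank, h]

lemma popLeadingBlank_cons_keep (l : String) (xs : List String)
    (h : ¬ PySem.Str.strip l = "") : popLeadingBlank (l :: xs) = l :: xs := by
  simp [popLeadingBlank, h]

-- A's filtering loop is a filter
lemma foldlA_eq_filter (lines acc : List String) :
    lines.foldl (fun acc line =>
      if metaPrefixes.any (fun p => PySem.Str.startswith (PySem.Str.strip line) p) then acc
      else acc ++ [line]) acc
    = acc ++ lines.filter
        (fun line => ¬ metaPrefixes.any (fun p => PySem.Str.startswith (PySem.Str.strip line) p)) := by
  induction lines generalizing acc with
  | nil => simp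
  | cons l rest ih =>
    simp only [List.foldl_cons, List.filter_cons]
    by_cases h : (metaPrefixes.any (fun p => PySem.Str.startswith (PySem.Str.strip l) p)) = true
    · have h3 : ¬ (∀ x ∈ metaPrefixes,
          PySem.Chars.startswith (PySem.Chars.strip l.toList) x.toList = false) := by
        simpa using h
      rw [if_pos h, ih]
      simp [h3]
    · have h2 : ∀ x ∈ metaPrefixes,
          PySem.Chars.startswith (PySem.Chars.strip l.toList) x.toList = false := by
        simpa using h
      rw [if_neg h, ih]
      simp
      exact h2

-- B's latch loop computes popLeadingBlank ∘ filter (latch off) resp. plain filter (latch on)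
lemma foldlB_invariant (lines : List String) (st : Bool) (acc : List String) :
    (lines.foldl (fun (st : Bool × List String) line =>
      if metaPrefixes.any (fun p => PySem.Str.startswith (PySem.Str.strip line) p) then st
      else if !st.1 && PySem.Str.strip line = "" then st
      else (true, st.2 ++ [line])) (st, acc)).2
    = acc ++ (if st then
        lines.filter (fun line => ¬ metaPrefixes.any (fun p => PySem.Str.startswith (PySem.Str.strip line) p))
      else popLeadingBlank (lines.filter
        (fun line => ¬ metaPrefixes.any (fun p => PySem.Str.startswith (PySem.Str.strip line) p)))) := by
  induction lines generalizing st acc with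
  | nil => cases st <;> simp [popLeadingBlank]
  | cons l rest ih =>
    simp only [List.foldl_cons]
    by_cases hm : (metaPrefixes.any (fun p => PySem.Str.startswith (PySem.Str.strip l) p)) = true
    · have hm3 : ¬ (∀ x ∈ metaPrefixes,
          PySem.Chars.startswith (PySem.Chars.strip l.toList) x.toList = false) := by
        simpa using hm
      rw [if_pos hm, ih]
      simp [hm3]
    · have hm2 : ∀ p ∈ metaPrefixes,
          PySem.Chars.startswith (PySem.Chars.strip l.toList) p.toList = false := by
        simpa using hm
      cases st with
      | true =>
        rw [if_neg hm, if_neg (by simp), ih]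
        simp [List.filter_cons]
        exact hm2
      | false =>
        by_cases hb : PySem.Str.strip l = ""
        · rw [if_neg hm, if_pos (by simp [hb]), ih]
          simp [List.filter_cons]
          rw [if_pos hm2, popLeadingBlank_cons_blank _ _ hb]
        · rw [if_neg hm, if_neg (by simp [hb]), ih]
          simp [List.filter_cons]
          rw [if_pos hm2, popLeadingBlank_cons_keep _ _ hb]

-- ===== VERDICT (by name: the statement is the Claim_ definition above) =====
theorem strip_config_comments_spec : Claim_equal_strip_config_comments := by
  intro sql _
  unfold Spec_strip_config_comments strip_config_comments strip_config_comments_alt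
  rw [foldlB_invariant, foldlA_eq_filter]
  simp
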